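-- pv_equiv track=rewrite | github.com/ChanChar/whiteboard | codeeval/stack_implemention.py | implement_stack
-- ===== SOURCE A (Python) =====
-- def implement_stack(arr):
--     stack = []
--     reverse_stack = []
--     i = 0
--
--     for el in arr:
--         stack.append(el)
--     while len(stack) > 0:
--         if i % 2 == 0:
--             reverse_stack.append(str(stack.pop()))
--         else:
--             stack.pop()
--         i += 1
--     return " ".join(reverse_stack)
-- ===== SOURCE B (Python) =====
-- def implement_stack(arr):
--     return " ".join(str(x) for x in arr[::-1][::2])
-- ===== Notes on version B (the rewrite author's own statement) =====
-- stated objective: simpler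
-- what changed: Replaces the stack copy, pop loop and parity counter with a one-line reverse slice plus a step-2 slice joined directly.
import Mathlib
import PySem

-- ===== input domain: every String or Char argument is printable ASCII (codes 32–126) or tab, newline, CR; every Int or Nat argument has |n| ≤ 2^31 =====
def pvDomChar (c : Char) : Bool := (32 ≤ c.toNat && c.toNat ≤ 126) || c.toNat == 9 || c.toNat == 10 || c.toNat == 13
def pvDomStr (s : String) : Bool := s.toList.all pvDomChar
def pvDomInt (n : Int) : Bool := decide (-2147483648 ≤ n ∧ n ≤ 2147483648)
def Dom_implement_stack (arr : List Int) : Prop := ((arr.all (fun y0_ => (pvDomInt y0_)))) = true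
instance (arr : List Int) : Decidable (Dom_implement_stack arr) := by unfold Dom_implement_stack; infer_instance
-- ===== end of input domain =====

-- B replaces A's stack copy, pop loop and parity counter with a reverse slice and a step-2 slice joined directly (simpler).


-- ===== PORT A =====
-- the 'while len(stack) > 0' loop: pop from the end, keep the popped element (as str) on even i
def pvWhileA (stack : List Int) (i : Int) (rev : List String) : List String :=
  if 0 < stack.length then
    match h : PySem.List.pop? stack with
    | some (x, rest) =>
        if PySem.Int.mod i 2 = 0 then pvWhileA rest (i + 1) (rev ++ [PySem.Int.toStr x])
        else pvWhileA rest (i + 1) rev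
    | none => rev   -- unreachable: pop? on a nonempty list returns some
  else rev
termination_by stack.length
decreasing_by all_goals (have := PySem.List.length_of_pop?_eq_some _ h; simp at this; omega)

def implement_stack (arr : List Int) : String :=
  let stack := arr.foldl (fun s el => s ++ [el]) []
  PySem.Str.join " " (pvWhileA stack 0 [])

-- ===== PORT B =====
def implement_stack_alt (arr : List Int) : String :=
  let rev := (PySem.List.slice? arr none none (-1)).getD []     -- arr[::-1]; step ≠ 0, never none
  let kept := (PySem.List.slice? rev none none 2).getD []       -- [::2]; step ≠ 0, never none
  PySem.Str.join " " (kept.map PySem.Int.toStr)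

-- ===== PRECONDITION & SPEC =====
def Spec_implement_stack (arr : List Int) (out : String) : Prop := out = implement_stack_alt arr
instance (arr : List Int) (out : String) : Decidable (Spec_implement_stack arr out) := by unfold Spec_implement_stack; infer_instance

-- ===== CLAIM (what is proved, stated in full; the proofs are below) =====
def Claim_equal_implement_stack : Prop := ∀ (arr : List Int), Dom_implement_stack arr → Spec_implement_stack arr (implement_stack arr)

-- ===== LEMMAS AND PROOFS =====

/-- the elements at even indices, shared reference point of both proofs -/
def pvEveryOther : List Int → List Int
  | [] => []
  | [x] => [x]
  | x :: _ :: t => x :: pvEveryOther t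

lemma pvEveryOther_cons (a : Int) (m : List Int) :
    pvEveryOther (a :: m) = a :: pvEveryOther m.tail := by
  cases m <;> rfl

lemma pvSlice2_eq (l : List Int) :
    PySem.List.slice? l none none 2 =
      some ((List.range ((l.length + 1) / 2)).filterMap (fun k => l[2 * k]?)) := by
  simp only [PySem.List.slice?, PySem.List.sliceIndices]
  norm_num
  have h1 : (if 0 < l.length then (((l.length : Int) + 2 - 1) / 2).toNat else 0)
      = (l.length + 1) / 2 := by split <;> omega
  have h2 : (fun x : Nat => l[(2 * (x : Int)).toNat]?) = fun k => l[2 * k]? := by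
    funext k; rw [show ((2 : Int) * (k : Int)).toNat = 2 * k by omega]
  rw [h1, h2]

lemma pvFilterMap_everyOther (l : List Int) :
    (List.range ((l.length + 1) / 2)).filterMap (fun k => l[2 * k]?) = pvEveryOther l := by
  induction l using pvEveryOther.induct with
  | case1 => simp [pvEveryOther]
  | case2 x => simp [pvEveryOther]
  | case3 x y t IH =>
    have hc : ((x :: y :: t).length + 1) / 2 = (t.length + 1) / 2 + 1 := by
      simp [List.length_cons]; omega
    rw [pvEveryOther, hc, List.range_succ_eq_map, List.filterMap_cons, List.filterMap_map]
    have h2 : ((fun k => (x :: y :: t)[2 * k]?) ∘ Nat.succ) = fun k => t[2 * k]? := by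
      funext k
      show (x :: y :: t)[2 * (k + 1)]? = _
      rw [show 2 * (k + 1) = 2 * k + 1 + 1 by ring]
      simp
    simp only [h2, IH]
    norm_num

lemma pvWhileA_append (ys : List Int) (x : Int) (i : Int) (rev : List String) :
    pvWhileA (ys ++ [x]) i rev =
      (if PySem.Int.mod i 2 = 0 then pvWhileA ys (i + 1) (rev ++ [PySem.Int.toStr x])
       else pvWhileA ys (i + 1) rev) := by
  rw [pvWhileA]
  rw [if_pos (by simp)]
  split
  next a b heq => rw [PySem.List.pop?_last] at heq; cases heq; rfl
  next heq => rw [PySem.List.pop?_last] at heq; cases heq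

lemma pvWhileA_spec (s : List Int) : ∀ (i : Int) (rev : List String),
    pvWhileA s i rev = rev ++ List.map PySem.Int.toStr
      (if i % 2 = 0 then pvEveryOther s.reverse else pvEveryOther s.reverse.tail) := by
  induction s using List.reverseRecOn with
  | nil => intro i rev; rw [pvWhileA]; simp [pvEveryOther]
  | append_singleton ys x IH =>
    intro i rev
    rw [pvWhileA_append]
    simp only [List.reverse_append, List.reverse_singleton, List.singleton_append,
      pvEveryOther_cons, List.tail_cons]
    rw [PySem.Int.mod_eq_emod_of_pos (by omega : (0:Int) < 2)]
    by_cases h : i % 2 = 0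
    · rw [if_pos h, IH]
      rw [if_neg (show ¬(i + 1) % 2 = 0 by omega), if_pos h]
      simp
    · rw [if_neg h, IH]
      rw [if_pos (show (i + 1) % 2 = 0 by omega), if_neg h]

-- ===== VERDICT (by name: the statement is the Claim_ definition above) =====
theorem implement_stack_spec : Claim_equal_implement_stack := by
  intro arr _
  unfold Spec_implement_stack implement_stack implement_stack_alt
  simp only [PySem.List.foldl_append_singleton, List.nil_append,
      PySem.List.slice?_none_none_neg_one, Option.getD_some,
      pvSlice2_eq, pvFilterMap_everyOther, pvWhileA_spec]
  norm_num
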